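-- pv_equiv track=rewrite | github.com/guillaumehuet/AdventOfCode | 2022/23_2/solve.py | elvesToGrid
-- ===== SOURCE A (Python) =====
-- def elvesToGrid(elves):
--   minX = 0
--   maxX = 0
--   minY = 0
--   maxY = 0
--   for elf in elves:
--     minX = min(minX, elf[0])
--     maxX = max(maxX, elf[0])
--     minY = min(minY, elf[1])
--     maxY = max(maxY, elf[1])
--   result = []
--   for y in range(minY, maxY + 1):
--     result.append([])
--     for x in range(minX, maxX + 1):
--       if (x, y) in elves:
--         result[-1].append(True)
--       else:
--         result[-1].append(False)
--   return result
-- ===== SOURCE B (Python) =====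
-- def elvesToGrid(elves):
--   minX = 0
--   maxX = 0
--   minY = 0
--   maxY = 0
--   for elf in elves:
--     minX = min(minX, elf[0])
--     maxX = max(maxX, elf[0])
--     minY = min(minY, elf[1])
--     maxY = max(maxY, elf[1])
--   result = [[False] * (maxX - minX + 1) for _ in range(maxY - minY + 1)]
--   for (x, y) in elves:
--     result[y - minY][x - minX] = True
--   return result
-- ===== Notes on version B (the rewrite author's own statement) =====
-- stated objective: faster
-- what changed: B keeps the bounding-box min/max loop but replaces the per-cell 'is (x,y) in elves' membership scan over the whole grid by building an all-False grid once and scattering each elf directly into its cell via index assignment.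
import Mathlib
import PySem

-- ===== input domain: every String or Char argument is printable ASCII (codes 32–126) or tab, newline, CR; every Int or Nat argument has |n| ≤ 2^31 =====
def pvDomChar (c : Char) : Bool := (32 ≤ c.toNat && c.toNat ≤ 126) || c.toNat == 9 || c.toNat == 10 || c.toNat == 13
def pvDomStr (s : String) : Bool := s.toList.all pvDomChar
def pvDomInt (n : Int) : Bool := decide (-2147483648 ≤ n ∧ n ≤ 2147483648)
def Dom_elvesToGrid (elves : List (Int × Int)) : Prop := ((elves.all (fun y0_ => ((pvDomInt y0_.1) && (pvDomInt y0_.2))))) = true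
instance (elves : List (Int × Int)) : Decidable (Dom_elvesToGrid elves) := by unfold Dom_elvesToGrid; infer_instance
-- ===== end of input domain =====

-- B keeps A's bounding-box fold but builds an all-False grid once and scatters each
-- elf into its own cell, instead of testing list membership for every cell of the box.

-- shared helper: A's four running min/max variables, state ((minX, maxX), (minY, maxY))
def pvBoundsStep (s : (Int × Int) × Int × Int) (elf : Int × Int) : (Int × Int) × Int × Int :=
  ((min s.1.1 elf.1, max s.1.2 elf.1), min s.2.1 elf.2, max s.2.2 elf.2)

-- ===== PORT A =====
def elvesToGrid (elves : List (Int × Int)) : List (List Bool) :=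
  let s := elves.foldl pvBoundsStep ((0, 0), 0, 0)
  (PySem.List.pyRange s.2.1 (s.2.2 + 1) 1).map (fun y =>
    (PySem.List.pyRange s.1.1 (s.1.2 + 1) 1).map (fun x => decide ((x, y) ∈ elves)))

-- ===== PORT B =====
-- result[y - minY][x - minX] = True: both offsets are nonnegative and in range by the bounding box
def elvesToGrid_alt (elves : List (Int × Int)) : List (List Bool) :=
  let s := elves.foldl pvBoundsStep ((0, 0), 0, 0)
  let g0 := List.replicate (s.2.2 - s.2.1 + 1).toNat (List.replicate (s.1.2 - s.1.1 + 1).toNat false)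
  elves.foldl (fun g e => g.modify (e.2 - s.2.1).toNat (fun row => row.set (e.1 - s.1.1).toNat true)) g0

-- ===== PRECONDITION & SPEC =====
def Spec_elvesToGrid (elves : List (Int × Int)) (out : List (List Bool)) : Prop := out = elvesToGrid_alt elves
instance (elves : List (Int × Int)) (out : List (List Bool)) : Decidable (Spec_elvesToGrid elves out) := by unfold Spec_elvesToGrid; infer_instance

-- ===== CLAIM (what is proved, stated in full; the proofs are below) =====
def Claim_equal_elvesToGrid : Prop := ∀ (elves : List (Int × Int)), Dom_elvesToGrid elves → Spec_elvesToGrid elves (elvesToGrid elves)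

-- ===== LEMMAS AND PROOFS =====

-- the fold only shrinks the mins and grows the maxes
lemma pvBounds_mono (elves : List (Int × Int)) (s : (Int × Int) × Int × Int) :
    (elves.foldl pvBoundsStep s).1.1 ≤ s.1.1 ∧ s.1.2 ≤ (elves.foldl pvBoundsStep s).1.2 ∧
    (elves.foldl pvBoundsStep s).2.1 ≤ s.2.1 ∧ s.2.2 ≤ (elves.foldl pvBoundsStep s).2.2 := by
  induction elves generalizing s with
  | nil => simp
  | cons e es ih =>
    have h := ih (pvBoundsStep s e)
    simp only [List.foldl_cons] at h ⊢
    simp only [pvBoundsStep] at h ⊢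
    omega

-- every elf lies inside the final bounding box
lemma pvBounds_bounds (elves : List (Int × Int)) (s : (Int × Int) × Int × Int) :
    ∀ e ∈ elves,
      (elves.foldl pvBoundsStep s).1.1 ≤ e.1 ∧ e.1 ≤ (elves.foldl pvBoundsStep s).1.2 ∧
      (elves.foldl pvBoundsStep s).2.1 ≤ e.2 ∧ e.2 ≤ (elves.foldl pvBoundsStep s).2.2 := by
  induction elves generalizing s with
  | nil => simp
  | cons a es ih =>
    intro e he
    rcases List.mem_cons.mp he with rfl | he
    · have h := pvBounds_mono es (pvBoundsStep s e)
      simp only [List.foldl_cons]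
      simp only [pvBoundsStep] at h ⊢
      omega
    · simpa using ih (pvBoundsStep s a) e he

-- cell read with Python's in-range accesses expressed through defaults
def pvCell (g : List (List Bool)) (r c : Nat) : Bool := (g.getD r []).getD c false

-- modifying one row by a set keeps every row length
lemma pvModify_rows (g : List (List Bool)) (i ce : Nat) (C : Nat)
    (hrow : ∀ row ∈ g, row.length = C) :
    ∀ row ∈ g.modify i (fun row => row.set ce true), row.length = C := by
  intro row hr
  rcases List.mem_iff_getElem.mp hr with ⟨j, hj, rfl⟩
  rw [List.getElem_modify]
  split
  · simp only [List.length_set]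
    exact hrow _ (List.getElem_mem (by simpa using hj))
  · exact hrow _ (List.getElem_mem (by simpa using hj))

-- one scatter write, read back cell-wise
lemma pvSet_cell (minX minY : Int) (C : Nat) (g : List (List Bool)) (e : Int × Int)
    (hrow : ∀ row ∈ g, row.length = C)
    (He1 : minX ≤ e.1) (He2 : minY ≤ e.2)
    (Her : (e.2 - minY).toNat < g.length) (Hec : (e.1 - minX).toNat < C) (r c : Nat) :
    pvCell (g.modify (e.2 - minY).toNat (fun row => row.set (e.1 - minX).toNat true)) r c
      = (pvCell g r c || decide ((minX + (c : Int), minY + (r : Int)) = e)) := by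
  have hfst : c ≠ (e.1 - minX).toNat → ((minX + (c : Int), minY + (r : Int)) : Int × Int) ≠ e := by
    intro hne hEq
    have h1 := congrArg Prod.fst hEq
    simp only at h1
    omega
  have hsnd : r ≠ (e.2 - minY).toNat → ((minX + (c : Int), minY + (r : Int)) : Int × Int) ≠ e := by
    intro hne hEq
    have h2 := congrArg Prod.snd hEq
    simp only at h2
    omega
  cases hgr : g[r]? with
  | none =>
    have hlen : g.length ≤ r := List.getElem?_eq_none_iff.mp hgr
    rw [decide_eq_false (hsnd (by omega)), Bool.or_false]
    unfold pvCell
    simp only [List.getD_eq_getElem?_getD, List.getElem?_modify, hgr]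
    simp
  | some row =>
    have hex := List.getElem?_eq_some_iff.mp hgr
    have hrowlen : row.length = C := by
      obtain ⟨hlt, heq⟩ := hex
      exact heq ▸ hrow _ (List.getElem_mem hlt)
    unfold pvCell
    simp only [List.getD_eq_getElem?_getD, List.getElem?_modify, hgr, Option.map_eq_map,
      Option.map_some, Option.getD_some]
    by_cases hre : (e.2 - minY).toNat = r
    · rw [if_pos hre]
      by_cases hce : (e.1 - minX).toNat = c
      · have hp : ((minX + (c : Int), minY + (r : Int)) : Int × Int) = e :=
          Prod.ext (by omega) (by omega)
        rw [decide_eq_true hp, Bool.or_true]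
        simp only [List.getElem?_set, if_pos hce,
          if_pos (show (e.1 - minX).toNat < row.length by omega)]
        simp
      · rw [decide_eq_false (hfst (fun h => hce h.symm)), Bool.or_false]
        simp only [List.getElem?_set, if_neg hce]
    · rw [if_neg hre]
      rw [decide_eq_false (hsnd (fun h => hre h.symm)), Bool.or_false]

-- the scatter loop's invariant: a cell is set iff it was set or some elf maps to it
lemma pvScatter_cell (minX minY : Int) (C : Nat) (es : List (Int × Int)) :
    ∀ (g : List (List Bool)),
      (∀ row ∈ g, row.length = C) →
      (∀ e ∈ es, minX ≤ e.1 ∧ minY ≤ e.2 ∧ (e.2 - minY).toNat < g.length ∧ (e.1 - minX).toNat < C) →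
      ∀ r c : Nat,
        pvCell (es.foldl (fun g e => g.modify (e.2 - minY).toNat (fun row => row.set (e.1 - minX).toNat true)) g) r c
          = (pvCell g r c || decide ((minX + (c : Int), minY + (r : Int)) ∈ es)) := by
  induction es with
  | nil => intro g _ _ r c; simp
  | cons e es ih =>
    intro g hrow H r c
    have He := H e (List.mem_cons_self ..)
    have hrow' := pvModify_rows g (e.2 - minY).toNat (e.1 - minX).toNat C hrow
    have hlen' : (g.modify (e.2 - minY).toNat (fun row => row.set (e.1 - minX).toNat true)).length = g.length :=
      List.length_modify ..
    have H' : ∀ e' ∈ es, minX ≤ e'.1 ∧ minY ≤ e'.2 ∧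
        (e'.2 - minY).toNat < (g.modify (e.2 - minY).toNat (fun row => row.set (e.1 - minX).toNat true)).length ∧
        (e'.1 - minX).toNat < C := by
      intro e' he'
      have := H e' (List.mem_cons_of_mem _ he')
      omega
    simp only [List.foldl_cons]
    rw [ih _ hrow' H' r c,
        pvSet_cell minX minY C g e hrow He.1 He.2.1 He.2.2.1 He.2.2.2 r c]
    simp only [List.mem_cons, Bool.decide_or, Bool.or_assoc]

-- scatter preserves the grid shape
lemma pvScatter_shape (minX minY : Int) (es : List (Int × Int)) (g : List (List Bool)) (C : Nat)
    (hrow : ∀ row ∈ g, row.length = C) :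
    (es.foldl (fun g e => g.modify (e.2 - minY).toNat (fun row => row.set (e.1 - minX).toNat true)) g).length = g.length ∧
    ∀ row ∈ es.foldl (fun g e => g.modify (e.2 - minY).toNat (fun row => row.set (e.1 - minX).toNat true)) g, row.length = C := by
  induction es generalizing g with
  | nil => exact ⟨rfl, hrow⟩
  | cons e es ih =>
    have h := ih (g.modify (e.2 - minY).toNat (fun row => row.set (e.1 - minX).toNat true))
      (pvModify_rows g (e.2 - minY).toNat (e.1 - minX).toNat C hrow)
    simp only [List.foldl_cons]
    exact ⟨by rw [h.1, List.length_modify], h.2⟩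

-- grids are equal when lengths, row lengths and all default-read cells agree
lemma pvGrid_ext (g1 g2 : List (List Bool))
    (hl : g1.length = g2.length)
    (hrl : ∀ r : Nat, (g1.getD r []).length = (g2.getD r []).length)
    (hc : ∀ r c : Nat, pvCell g1 r c = pvCell g2 r c) : g1 = g2 := by
  apply List.ext_getElem hl
  intro r h1 h2
  apply List.ext_getElem
  · have := hrl r
    rwa [List.getD_eq_getElem _ _ h1, List.getD_eq_getElem _ _ h2] at this
  · intro c hc1 hc2
    have := hc r c
    unfold pvCell at this
    rwa [List.getD_eq_getElem _ _ h1, List.getD_eq_getElem _ _ h2,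
         List.getD_eq_getElem _ _ hc1, List.getD_eq_getElem _ _ hc2] at this

-- a fresh replicate grid reads false everywhere
lemma pvCell_replicate (R C r c : Nat) :
    pvCell (List.replicate R (List.replicate C false)) r c = false := by
  unfold pvCell
  simp only [List.getD_eq_getElem?_getD, List.getElem?_replicate]
  by_cases hr : r < R
  · rw [if_pos hr]
    simp only [Option.getD_some, List.getD_eq_getElem?_getD, List.getElem?_replicate]
    by_cases hc : c < C
    · rw [if_pos hc]; simp
    · rw [if_neg hc]; simp
  · rw [if_neg hr]; simp

-- ===== VERDICT (by name: the statement is the Claim_ definition above) =====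
theorem elvesToGrid_spec : Claim_equal_elvesToGrid := by
  intro elves _
  unfold Spec_elvesToGrid elvesToGrid elvesToGrid_alt
  have hmono := pvBounds_mono elves ((0, 0), 0, 0)
  have hbnd := pvBounds_bounds elves ((0, 0), 0, 0)
  set s := elves.foldl pvBoundsStep ((0, 0), 0, 0) with hs
  simp only at hmono hbnd ⊢
  set R := (s.2.2 - s.2.1 + 1).toNat with hR
  set C := (s.1.2 - s.1.1 + 1).toNat with hC
  have hrow0 : ∀ row ∈ List.replicate R (List.replicate C false), row.length = C := by
    intro row hr
    rw [List.eq_of_mem_replicate hr, List.length_replicate]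
  have hlen0 : (List.replicate R (List.replicate C false)).length = R := List.length_replicate
  have Hin : ∀ e ∈ elves, s.1.1 ≤ e.1 ∧ s.2.1 ≤ e.2 ∧
      (e.2 - s.2.1).toNat < (List.replicate R (List.replicate C false)).length ∧
      (e.1 - s.1.1).toNat < C := by
    intro e he
    have := hbnd e he
    rw [hlen0]
    omega
  have hshape := pvScatter_shape s.1.1 s.2.1 elves (List.replicate R (List.replicate C false)) C hrow0
  have hcellB := pvScatter_cell s.1.1 s.2.1 C elves (List.replicate R (List.replicate C false)) hrow0 Hin
  -- lengths of the A grid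
  have hlenA : ((PySem.List.pyRange s.2.1 (s.2.2 + 1) 1).map (fun y =>
      (PySem.List.pyRange s.1.1 (s.1.2 + 1) 1).map (fun x => decide ((x, y) ∈ elves)))).length = R := by
    rw [List.length_map, PySem.List.length_pyRange_one]
    omega
  apply pvGrid_ext
  · rw [hlenA, hshape.1, hlen0]
  · intro r
    by_cases hr : r < R
    · have h1 : r < ((PySem.List.pyRange s.2.1 (s.2.2 + 1) 1).map (fun y =>
          (PySem.List.pyRange s.1.1 (s.1.2 + 1) 1).map (fun x => decide ((x, y) ∈ elves)))).length := by
        rw [hlenA]; exact hr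
      have h2 : r < (elves.foldl (fun g e => g.modify (e.2 - s.2.1).toNat (fun row => row.set (e.1 - s.1.1).toNat true))
          (List.replicate R (List.replicate C false))).length := by
        rw [hshape.1, hlen0]; exact hr
      rw [List.getD_eq_getElem _ _ h1, List.getD_eq_getElem _ _ h2,
          List.getElem_map, List.length_map, PySem.List.length_pyRange_one,
          hshape.2 _ (List.getElem_mem h2)]
      omega
    · rw [List.getD_eq_default _ _ (by rw [hlenA]; omega),
          List.getD_eq_default _ _ (by rw [hshape.1, hlen0]; omega)]
  · intro r c
    rw [hcellB r c, pvCell_replicate, Bool.false_or]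
    by_cases hrc : r < R ∧ c < C
    · unfold pvCell
      have h1 : r < ((PySem.List.pyRange s.2.1 (s.2.2 + 1) 1).map (fun y =>
          (PySem.List.pyRange s.1.1 (s.1.2 + 1) 1).map (fun x => decide ((x, y) ∈ elves)))).length := by
        rw [hlenA]; exact hrc.1
      rw [List.getD_eq_getElem _ _ h1, List.getElem_map,
          List.getD_eq_getElem _ _ (by rw [List.length_map, PySem.List.length_pyRange_one]; omega),
          List.getElem_map, PySem.List.getElem_pyRange_one, PySem.List.getElem_pyRange_one]
    · -- outside the bounding box both sides read false
      have hmem : decide (((s.1.1 + (c : Int), s.2.1 + (r : Int)) : Int × Int) ∈ elves) = false := by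
        apply decide_eq_false
        intro hmem
        have := hbnd _ hmem
        simp only at this
        omega
      rw [hmem]
      unfold pvCell
      by_cases hr : r < R
      · have hcge : ¬ c < C := fun h => hrc ⟨hr, h⟩
        have h1 : r < ((PySem.List.pyRange s.2.1 (s.2.2 + 1) 1).map (fun y =>
            (PySem.List.pyRange s.1.1 (s.1.2 + 1) 1).map (fun x => decide ((x, y) ∈ elves)))).length := by
          rw [hlenA]; exact hr
        rw [List.getD_eq_getElem _ _ h1, List.getElem_map,
            List.getD_eq_default _ _ (by rw [List.length_map, PySem.List.length_pyRange_one]; omega)]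
      · have hA : ((PySem.List.pyRange s.2.1 (s.2.2 + 1) 1).map (fun y =>
            (PySem.List.pyRange s.1.1 (s.1.2 + 1) 1).map (fun x => decide ((x, y) ∈ elves)))).getD r [] = [] :=
          List.getD_eq_default _ _ (by rw [hlenA]; omega)
        rw [hA]
        simp
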